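-- pv_equiv track=rewrite | github.com/subhrajeetghosh/python-code-dsa | leetcode/test_code.py | marbles_distribution
-- ===== SOURCE A (Python) =====
-- def marbles_distribution(weights, k):
--     n = len(weights)
--
--     # Edge cases
--     if k == 1:
--         return 0  # Only one bag, score is fixed (weights[0] + weights[n-1])
--     if n < k:
--         return 0  # Impossible to split into k non-empty bags
--
--     # Recursive function: returns (min_score, max_score) for given start and bags_left
--     def distribute(start, bags_left):
--         # Base case: one bag left, use all remaining marbles
--         if bags_left == 1:
--             if start >= n:
--                 return float('inf'), float('-inf')  # Invalid
--             score = weights[start] + weights[n - 1]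
--             return score, score
--
--         # If not enough marbles for remaining bags
--         remaining = n - start
--         if remaining < bags_left:
--             return float('inf'), float('-inf')  # Invalid
--
--         min_score = float('inf')
--         max_score = float('-inf')
--
--         # Try all possible end points for the current bag
--         # Bag must have at least 1 marble, and leave enough for remaining bags
--         for end in range(start, n - bags_left + 1):  # Ensure enough marbles left
--             current_cost = weights[start] + weights[end]
--             # Recursively solve for remaining marbles and bags
--             sub_min, sub_max = distribute(end + 1, bags_left - 1)
--             if sub_min != float('inf'):  # Valid subproblem
--                 total_min = current_cost + sub_min
--                 total_max = current_cost + sub_max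
--                 min_score = min(min_score, total_min)
--                 max_score = max(max_score, total_max)
--
--         return min_score, max_score
--
--     # Start recursion from index 0 with k bags
--     min_score, max_score = distribute(0, k)
--     return max_score - min_score if min_score != float('inf') else 0
-- ===== SOURCE B (Python) =====
-- def marbles_distribution(weights, k):
--     n = len(weights)
--     if k == 1 or n < k:
--         return 0
--     # score of any split = weights[0] + weights[n-1] + sum of k-1 chosen adjacent pair sums,
--     # so max-min = (top k-1 pair sums) - (bottom k-1 pair sums)
--     pairs = sorted(weights[i] + weights[i + 1] for i in range(n - 1))
--     return sum(pairs[n - k:]) - sum(pairs[:k - 1])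
-- ===== Notes on version B (the rewrite author's own statement) =====
-- stated objective: alternative
-- what changed: Replaced the exponential recursion over all split points by the closed-form identity that every split's score is weights[0]+weights[n-1] plus k-1 chosen adjacent pair sums, so the answer is (sum of the k-1 largest pair sums) - (sum of the k-1 smallest), computed by one sort.
import Mathlib
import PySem

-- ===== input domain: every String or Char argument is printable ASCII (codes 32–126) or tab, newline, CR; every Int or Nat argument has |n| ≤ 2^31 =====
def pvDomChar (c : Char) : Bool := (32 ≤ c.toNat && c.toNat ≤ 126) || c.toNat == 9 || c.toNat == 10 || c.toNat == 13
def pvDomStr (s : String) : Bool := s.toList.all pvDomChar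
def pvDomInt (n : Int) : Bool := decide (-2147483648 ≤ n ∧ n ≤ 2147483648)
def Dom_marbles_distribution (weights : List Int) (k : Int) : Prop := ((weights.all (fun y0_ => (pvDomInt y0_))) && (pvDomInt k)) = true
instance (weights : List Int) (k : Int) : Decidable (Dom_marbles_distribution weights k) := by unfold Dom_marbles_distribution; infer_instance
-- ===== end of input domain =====

-- B replaces A's recursion over all split points by one sort of the n-1 adjacent
-- pair sums: score of any split = w[0]+w[n-1] + (k-1 chosen pair sums), so max-min =
-- (top k-1 pair sums) - (bottom k-1 pair sums).  Objective: alternative algorithm.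


-- ===== PORT A =====
-- Python's float('inf') / float('-inf') sentinels become `none` of `Option Int`
-- (the "invalid" marker); `omin`/`omax` are Python's min/max with that sentinel.
def omin : Option Int → Option Int → Option Int
  | none,   b      => b
  | some x, none   => some x
  | some x, some y => some (min x y)

def omax : Option Int → Option Int → Option Int
  | none,   b      => b
  | some x, none   => some x
  | some x, some y => some (max x y)

-- current_cost + sub (sub = ±inf stays ±inf, i.e. none stays none)
def oadd (x : Int) : Option Int → Option Int
  | none   => none
  | some y => some (x + y)

-- distribute(start, bags_left); structural recursion on bags_left (a Nat: A is only
-- entered with k ≥ 2 — k ≤ 0, where Python recurses into an IndexError, is outside Pre_;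
-- the bags_left = 0 branch is a totality guard for that excluded region).
-- All list indices reached under Pre_ are in range, so pyGetD's default is never used.
def pvDistribute (w : List Int) (n : Nat) : Nat → Int → Option Int × Option Int
  | 0, _ => (none, none)
  | 1, start =>
      if (n : Int) ≤ start then (none, none)            -- start >= n: invalid
      else
        let score := PySem.List.pyGetD w start 0 + PySem.List.pyGetD w ((n : Int) - 1) 0
        (some score, some score)
  | (b+2), start =>
      if (n : Int) - start < ((b : Int) + 2) then (none, none)   -- remaining < bags_left
      else
        (PySem.List.pyRange start ((n : Int) - ((b : Int) + 2) + 1) 1).foldl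
          (fun acc e =>
            let cc := PySem.List.pyGetD w start 0 + PySem.List.pyGetD w e 0
            let sub := pvDistribute w n (b+1) (e + 1)
            if sub.1 ≠ none then
              (omin acc.1 (oadd cc sub.1), omax acc.2 (oadd cc sub.2))
            else acc)
          (none, none)

def marbles_distribution (weights : List Int) (k : Int) : Int :=
  let n := weights.length
  if k = 1 then 0
  else if (n : Int) < k then 0
  else
    -- return max_score - min_score if min_score != inf else 0
    -- (min_score is finite iff max_score is, so one match covers Python's test)
    match pvDistribute weights n k.toNat 0 with
    | (some mn, some mx) => mx - mn
    | _ => 0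

-- ===== PORT B =====
def marbles_distribution_alt (weights : List Int) (k : Int) : Int :=
  let n := weights.length
  if k = 1 ∨ (n : Int) < k then 0
  else
    let pairs := PySem.List.sorted
      ((List.range (n - 1)).map (fun i => weights.getD i 0 + weights.getD (i+1) 0))
      (fun x => x) false
    (PySem.List.slice pairs (some ((n : Int) - k)) none).sum
      - (PySem.List.slice pairs none (some (k - 1))).sum

-- ===== PRECONDITION & SPEC =====
-- Pre_ excludes exactly k ≤ 0: there Python A always raises (the recursion walks past
-- the end of the list, an IndexError), so A returns on precisely the inputs with k ≥ 1.
def Pre_marbles_distribution (weights : List Int) (k : Int) : Prop := 1 ≤ k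
instance (weights : List Int) (k : Int) : Decidable (Pre_marbles_distribution weights k) := by
  unfold Pre_marbles_distribution; infer_instance

def pvWitness_marbles_distribution : List Int × Int := ([1, 3, 5, 1], 2)

def Spec_marbles_distribution (weights : List Int) (k : Int) (out : Int) : Prop :=
  out = marbles_distribution_alt weights k
instance (weights : List Int) (k : Int) (out : Int) : Decidable (Spec_marbles_distribution weights k out) := by
  unfold Spec_marbles_distribution; infer_instance

-- ===== CLAIM (what is proved, stated in full; the proofs are below) =====
def Claim_equal_marbles_distribution : Prop :=
  ∀ (weights : List Int) (k : Int), Dom_marbles_distribution weights k →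
    Pre_marbles_distribution weights k →
    Spec_marbles_distribution weights k (marbles_distribution weights k)

-- ===== LEMMAS AND PROOFS =====

-- the adjacent pair sum at boundary i
def pairAt (w : List Int) (i : Nat) : Int := w.getD i 0 + w.getD (i+1) 0
-- the pair sums with boundary index ≥ s
def Pl (w : List Int) (s : Nat) : List Int := (List.range' s (w.length - 1 - s)).map (pairAt w)
-- the fixed part of every score for a suffix starting at s
def csum (w : List Int) (s : Nat) : Int := w.getD s 0 + w.getD (w.length - 1) 0

-- minimal / maximal sum of m elements picked (as a subsequence) from a list; none if < m elements
def minSel : Nat → List Int → Option Int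
  | 0, _ => some 0
  | _+1, [] => none
  | m+1, x :: xs => omin (oadd x (minSel m xs)) (minSel (m+1) xs)

def maxSel : Nat → List Int → Option Int
  | 0, _ => some 0
  | _+1, [] => none
  | m+1, x :: xs => omax (oadd x (maxSel m xs)) (maxSel (m+1) xs)

theorem omin_none_right (a : Option Int) : omin a none = a := by cases a <;> rfl
theorem omax_none_right (a : Option Int) : omax a none = a := by cases a <;> rfl
theorem omin_comm (a b : Option Int) : omin a b = omin b a := by
  cases a <;> cases b <;> simp [omin, min_comm]
theorem omax_comm (a b : Option Int) : omax a b = omax b a := by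
  cases a <;> cases b <;> simp [omax, max_comm]
theorem omin_assoc (a b c : Option Int) : omin (omin a b) c = omin a (omin b c) := by
  cases a <;> cases b <;> cases c <;> simp [omin, min_assoc]
theorem omax_assoc (a b c : Option Int) : omax (omax a b) c = omax a (omax b c) := by
  cases a <;> cases b <;> cases c <;> simp [omax, max_assoc]
theorem omin_left_comm (a b c : Option Int) : omin a (omin b c) = omin b (omin a c) := by
  rw [← omin_assoc, omin_comm a b, omin_assoc]
theorem omax_left_comm (a b c : Option Int) : omax a (omax b c) = omax b (omax a c) := by
  rw [← omax_assoc, omax_comm a b, omax_assoc]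
theorem oadd_omin (x : Int) (a b : Option Int) : oadd x (omin a b) = omin (oadd x a) (oadd x b) := by
  cases a <;> cases b <;> simp [omin, oadd]
theorem oadd_omax (x : Int) (a b : Option Int) : oadd x (omax a b) = omax (oadd x a) (oadd x b) := by
  cases a <;> cases b <;> simp [omax, oadd]
theorem oadd_oadd (x y : Int) (a : Option Int) : oadd x (oadd y a) = oadd (x + y) a := by
  cases a <;> simp [oadd]; omega
theorem oadd_eq_none_iff (x : Int) (a : Option Int) : oadd x a = none ↔ a = none := by
  cases a <;> simp [oadd]
theorem omin_eq_none_iff (a b : Option Int) : omin a b = none ↔ a = none ∧ b = none := by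
  cases a <;> cases b <;> simp [omin]
theorem omax_eq_none_iff (a b : Option Int) : omax a b = none ↔ a = none ∧ b = none := by
  cases a <;> cases b <;> simp [omax]

theorem minSel_none_iff : ∀ (m : Nat) (l : List Int), minSel m l = none ↔ l.length < m := by
  intro m l
  induction l generalizing m with
  | nil => cases m <;> simp [minSel]
  | cons x xs ih =>
    cases m with
    | zero => simp [minSel]
    | succ m => simp [minSel, omin_eq_none_iff, oadd_eq_none_iff, ih]; omega

theorem maxSel_none_iff : ∀ (m : Nat) (l : List Int), maxSel m l = none ↔ l.length < m := by
  intro m l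
  induction l generalizing m with
  | nil => cases m <;> simp [maxSel]
  | cons x xs ih =>
    cases m with
    | zero => simp [maxSel]
    | succ m => simp [maxSel, omax_eq_none_iff, oadd_eq_none_iff, ih]; omega

theorem minSel_swap (x y : Int) (l : List Int) (m : Nat) :
    minSel m (x :: y :: l) = minSel m (y :: x :: l) := by
  cases m with
  | zero => rfl
  | succ m =>
    cases m with
    | zero =>
      simp only [minSel]
      exact omin_left_comm _ _ _
    | succ m =>
      simp only [minSel]
      rw [oadd_omin, oadd_omin, oadd_oadd, oadd_oadd, Int.add_comm x y]
      rw [omin_assoc, omin_assoc, omin_left_comm (oadd x (minSel (m+1) l))]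

theorem maxSel_swap (x y : Int) (l : List Int) (m : Nat) :
    maxSel m (x :: y :: l) = maxSel m (y :: x :: l) := by
  cases m with
  | zero => rfl
  | succ m =>
    cases m with
    | zero =>
      simp only [maxSel]
      exact omax_left_comm _ _ _
    | succ m =>
      simp only [maxSel]
      rw [oadd_omax, oadd_omax, oadd_oadd, oadd_oadd, Int.add_comm x y]
      rw [omax_assoc, omax_assoc, omax_left_comm (oadd x (maxSel (m+1) l))]

theorem minSel_perm {l l' : List Int} (h : l.Perm l') : ∀ m, minSel m l = minSel m l' := by
  induction h with
  | nil => intro m; rfl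
  | cons x _ ih =>
    intro m
    cases m with
    | zero => rfl
    | succ m => simp [minSel, ih]
  | swap x y l =>
    intro m
    exact minSel_swap y x l m
  | trans _ _ ih1 ih2 => intro m; rw [ih1 m, ih2 m]

theorem maxSel_perm {l l' : List Int} (h : l.Perm l') : ∀ m, maxSel m l = maxSel m l' := by
  induction h with
  | nil => intro m; rfl
  | cons x _ ih =>
    intro m
    cases m with
    | zero => rfl
    | succ m => simp [maxSel, ih]
  | swap x y l =>
    intro m
    exact maxSel_swap y x l m
  | trans _ _ ih1 ih2 => intro m; rw [ih1 m, ih2 m]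

-- on an ascending list the minimal m-selection is the first m elements
theorem minSel_sorted : ∀ (l : List Int), l.Pairwise (· ≤ ·) → ∀ m, m ≤ l.length →
    minSel m l = some ((l.take m).sum) := by
  intro l
  induction l with
  | nil =>
    intro _ m hm
    have hm0 : m = 0 := by simpa using hm
    subst hm0
    simp [minSel]
  | cons x xs ih =>
    intro hp m hm
    rcases List.pairwise_cons.1 hp with ⟨hx, hp'⟩
    cases m with
    | zero => simp [minSel]
    | succ m =>
      have hmx : m ≤ xs.length := by simpa using hm
      simp only [minSel]
      rw [ih hp' m hmx, List.take_succ_cons, List.sum_cons]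
      by_cases hlt : m < xs.length
      · rw [ih hp' (m+1) hlt]
        have hget : xs.take (m+1) = xs.take m ++ [xs[m]] := by
          rw [List.take_add_one]
          simp [List.getElem?_eq_getElem hlt]
        have hxm : x ≤ xs[m] := hx _ (List.getElem_mem hlt)
        rw [hget, List.sum_append, List.sum_cons, List.sum_nil]
        simp only [oadd, omin]
        congr 1
        exact min_eq_left (by omega)
      · have hm' : m = xs.length := by omega
        subst hm'
        rw [(minSel_none_iff (xs.length+1) xs).2 (by omega), omin_none_right]
        simp [oadd, List.take_of_length_le]

-- on an ascending list the maximal m-selection is the last m elements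
theorem maxSel_sorted : ∀ (l : List Int), l.Pairwise (· ≤ ·) → ∀ m, m ≤ l.length →
    maxSel m l = some ((l.drop (l.length - m)).sum) := by
  intro l
  induction l with
  | nil =>
    intro _ m hm
    have hm0 : m = 0 := by simpa using hm
    subst hm0
    simp [maxSel]
  | cons x xs ih =>
    intro hp m hm
    rcases List.pairwise_cons.1 hp with ⟨hx, hp'⟩
    cases m with
    | zero => simp [maxSel]
    | succ m =>
      have hmx : m ≤ xs.length := by simpa using hm
      have hdrop : (x :: xs).length - (m+1) = xs.length - m := by
        simp only [List.length_cons]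
        omega
      simp only [maxSel]
      rw [ih hp' m hmx, hdrop]
      by_cases hlt : m < xs.length
      · rw [ih hp' (m+1) hlt]
        obtain ⟨j, hj⟩ : ∃ j, xs.length - m = j + 1 := ⟨xs.length - m - 1, by omega⟩
        have hidx : j < xs.length := by omega
        have hxm : x ≤ xs[j] := hx _ (List.getElem_mem hidx)
        rw [show xs.length - (m+1) = j from by omega, hj, List.drop_succ_cons,
            List.drop_eq_getElem_cons hidx]
        simp only [oadd, omax, List.sum_cons]
        congr 1
        exact max_eq_right (by omega)
      · have hm' : m = xs.length := by omega
        subst hm'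
        rw [(maxSel_none_iff (xs.length+1) xs).2 (by omega), omax_none_right]
        simp [oadd]

theorem Pl_length (w : List Int) (s : Nat) : (Pl w s).length = w.length - 1 - s := by
  simp [Pl]

theorem Pl_cons (w : List Int) (s : Nat) (h : s < w.length - 1) :
    Pl w s = pairAt w s :: Pl w (s+1) := by
  unfold Pl
  rw [show w.length - 1 - s = (w.length - 1 - (s+1)) + 1 by omega, List.range'_succ]
  simp

-- the inner for-loop computes the (m+1)-selection over the pair sums from s on
theorem loop_min (w : List Int) (c : Int) :
    ∀ (cnt s m : Nat) (a : Option Int), w.length - 1 = s + cnt + m →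
    (List.range' s cnt).foldl
      (fun acc t => omin acc (oadd c (oadd (pairAt w t) (minSel m (Pl w (t+1)))))) a
      = omin a (oadd c (minSel (m+1) (Pl w s))) := by
  intro cnt
  induction cnt with
  | zero =>
    intro s m a h
    have : (Pl w s).length < m + 1 := by rw [Pl_length]; omega
    rw [(minSel_none_iff _ _).2 this]
    simp [oadd, omin_none_right]
  | succ cnt ih =>
    intro s m a h
    rw [List.range'_succ, List.foldl_cons]
    rw [ih (s+1) m _ (by omega)]
    rw [Pl_cons w s (by omega), minSel, oadd_omin c, omin_assoc]

theorem loop_max (w : List Int) (c : Int) :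
    ∀ (cnt s m : Nat) (a : Option Int), w.length - 1 = s + cnt + m →
    (List.range' s cnt).foldl
      (fun acc t => omax acc (oadd c (oadd (pairAt w t) (maxSel m (Pl w (t+1)))))) a
      = omax a (oadd c (maxSel (m+1) (Pl w s))) := by
  intro cnt
  induction cnt with
  | zero =>
    intro s m a h
    have : (Pl w s).length < m + 1 := by rw [Pl_length]; omega
    rw [(maxSel_none_iff _ _).2 this]
    simp [oadd, omax_none_right]
  | succ cnt ih =>
    intro s m a h
    rw [List.range'_succ, List.foldl_cons]
    rw [ih (s+1) m _ (by omega)]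
    rw [Pl_cons w s (by omega), maxSel, oadd_omax c, omax_assoc]

-- range(start, n-bags+1) as the Nat list [s, s+1, …]
theorem pyRange_natCast_range' (s cnt : Nat) :
    PySem.List.pyRange (s : Int) ((s : Int) + (cnt : Int)) 1
      = (List.range' s cnt).map (fun t : Nat => (t : Int)) := by
  rw [PySem.List.pyRange_one]
  rw [show ((s : Int) + cnt - s) = (cnt : Int) by omega, Int.toNat_natCast]
  rw [List.range'_eq_map_range]
  rw [List.map_map]
  apply List.map_congr_left
  intro t _
  simp

-- the characterisation of A's recursion: distribute(s, b+1) is the fixed cost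
-- w[s]+w[n-1] plus the min/max b-selection over the pair sums with boundary ≥ s
theorem pvDistribute_eq (w : List Int) (b : Nat) : ∀ s : Nat, s < w.length →
    pvDistribute w w.length (b+1) (s : Int)
      = (oadd (csum w s) (minSel b (Pl w s)), oadd (csum w s) (maxSel b (Pl w s))) := by
  induction b with
  | zero =>
    intro s hs
    have hns : ¬ ((w.length : Int) ≤ (s : Int)) := by exact_mod_cast not_le.2 hs
    simp only [pvDistribute, hns, if_false]
    have h1 : (w.length : Int) - 1 = ((w.length - 1 : Nat) : Int) := by omega
    simp [minSel, maxSel, oadd, csum, h1, PySem.List.pyGetD_natCast]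
  | succ b ih =>
    intro s hs
    by_cases hrem : (w.length : Int) - (s : Int) < ((b : Int) + 2)
    · have hlen : (Pl w s).length < b + 1 := by rw [Pl_length]; omega
      simp only [pvDistribute, hrem, if_true]
      rw [(minSel_none_iff _ _).2 hlen, (maxSel_none_iff _ _).2 hlen]
      simp [oadd]
    · -- remaining ≥ bags: the loop runs over t = s, …, n-b-2
      have hn : s + b + 2 ≤ w.length := by omega
      simp only [pvDistribute, hrem, if_false]
      have hcnt : (w.length : Int) - ((b : Int) + 2) + 1 = (s : Int) + ((w.length - b - 1 - s : Nat) : Int) := by omega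
      rw [hcnt, pyRange_natCast_range', List.foldl_map]
      set cnt := w.length - b - 1 - s with hcntdef
      -- rewrite the loop body via the induction hypothesis, for members of the range
      rw [PySem.List.foldl_congr_mem
        (g := fun (acc : Option Int × Option Int) (t : Nat) =>
          (omin acc.1 (oadd (csum w s) (oadd (pairAt w t) (minSel b (Pl w (t+1))))),
           omax acc.2 (oadd (csum w s) (oadd (pairAt w t) (maxSel b (Pl w (t+1)))))))]
      · rw [PySem.List.foldl_prod_mk
          (f := fun (a : Option Int) (t : Nat) =>
            omin a (oadd (csum w s) (oadd (pairAt w t) (minSel b (Pl w (t+1))))))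
          (g := fun (a : Option Int) (t : Nat) =>
            omax a (oadd (csum w s) (oadd (pairAt w t) (maxSel b (Pl w (t+1)))))) ]
        rw [loop_min w (csum w s) cnt s b none (by omega),
            loop_max w (csum w s) cnt s b none (by omega)]
        rfl
      · intro acc t ht
        have htb : s ≤ t ∧ t < s + cnt := List.mem_range'_1.1 ht
        have ht1 : t + 1 < w.length := by omega
        have hcast : (t : Int) + 1 = ((t + 1 : Nat) : Int) := by omega
        simp only [hcast]
        rw [ih (t+1) ht1]
        by_cases hnone : minSel b (Pl w (t+1)) = none
        · have hmaxnone : maxSel b (Pl w (t+1)) = none := by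
            rw [maxSel_none_iff]; exact (minSel_none_iff _ _).1 hnone
          simp [hnone, hmaxnone, oadd, omin_none_right, omax_none_right]
        · have hmaxsome : maxSel b (Pl w (t+1)) ≠ none := by
            rw [ne_eq, maxSel_none_iff]
            exact fun hc => hnone ((minSel_none_iff _ _).2 hc)
          have hsome : oadd (csum w (t+1)) (minSel b (Pl w (t+1))) ≠ none := by
            rw [ne_eq, oadd_eq_none_iff]; exact hnone
          simp only [hsome, if_true, ne_eq, not_false_iff]
          rw [oadd_oadd, oadd_oadd, oadd_oadd, oadd_oadd]
          have harith :
              PySem.List.pyGetD w (s : Int) 0 + PySem.List.pyGetD w (t : Int) 0 + csum w (t+1)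
                = csum w s + pairAt w t := by
            simp [csum, pairAt, PySem.List.pyGetD_natCast]
            omega
          rw [harith]

-- ===== VERDICT (by name: the statement is the Claim_ definition above) =====
theorem marbles_distribution_spec : Claim_equal_marbles_distribution := by
  intro w k _ hpre
  unfold Spec_marbles_distribution marbles_distribution marbles_distribution_alt
  by_cases hk1 : k = 1
  · simp [hk1]
  · by_cases hnk : (w.length : Int) < k
    · simp [hk1, hnk]
    · -- main case: 2 ≤ k ≤ n
      have hk2 : 2 ≤ k := by
        have : 1 ≤ k := hpre
        omega
      have hkN : k.toNat = (k.toNat - 1) + 1 := by omega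
      have hn2 : 2 ≤ w.length := by
        have : (2 : Int) ≤ (w.length : Int) := le_trans hk2 (not_lt.1 hnk)
        exact_mod_cast this
      have h0n : 0 < w.length := by omega
      simp only [hk1, hnk, if_false, false_or, if_false]
      rw [hkN, show ((0 : Int) = ((0 : Nat) : Int)) by rfl, pvDistribute_eq w _ 0 h0n]
      -- relate both sides through the sorted pair-sum list
      have hperm : (PySem.List.sorted (Pl w 0) (fun x => x) false).Perm (Pl w 0) :=
        PySem.List.sorted_perm _ _ _
      have hpair : (PySem.List.sorted (Pl w 0) (fun x => x) false).Pairwise (· ≤ ·) :=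
        PySem.List.sorted_pairwise _ _
      set sp := PySem.List.sorted (Pl w 0) (fun x => x) false with hsp
      have hsplen : sp.length = w.length - 1 := by
        rw [hsp, PySem.List.length_sorted, Pl_length]
        omega
      have hkn : k.toNat - 1 ≤ sp.length := by
        rw [hsplen]
        have : (k : Int) ≤ (w.length : Int) := not_lt.1 hnk
        omega
      have hmin : minSel (k.toNat - 1) (Pl w 0) = some ((sp.take (k.toNat - 1)).sum) := by
        rw [← minSel_perm hperm, minSel_sorted sp hpair _ hkn]
      have hmax : maxSel (k.toNat - 1) (Pl w 0) = some ((sp.drop (sp.length - (k.toNat - 1))).sum) := by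
        rw [← maxSel_perm hperm, maxSel_sorted sp hpair _ hkn]
      rw [hmin, hmax]
      -- B's pair list is Pl w 0
      have hB : (List.range (w.length - 1)).map (fun i => w.getD i 0 + w.getD (i+1) 0) = Pl w 0 := by
        unfold Pl pairAt
        rw [List.range_eq_range', Nat.sub_zero]
      push_cast
      rw [hB]
      -- B's slices are drop / take
      have hdrop : PySem.List.slice sp (some ((w.length : Int) - k)) none
          = sp.drop (sp.length - (k.toNat - 1)) := by
        have hnk' : (w.length : Int) - k = ((w.length - k.toNat : Nat) : Int) := by omega
        rw [hnk', PySem.List.slice_from_natCast]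
        congr 1
        rw [hsplen]
        omega
      have htake : PySem.List.slice sp none (some (k - 1)) = sp.take (k.toNat - 1) := by
        have hk' : k - 1 = ((k.toNat - 1 : Nat) : Int) := by omega
        rw [hk', PySem.List.slice_to_natCast]
      rw [hdrop, htake]
      simp [oadd]
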